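-- pv_equiv track=rewrite | github.com/glm729/anpc_public | hmdb_stratification/hmdb_stratification.py | taxonomy_info_groups
-- ===== SOURCE A (Python) =====
-- def taxonomy_info_groups(data):
--     result = {}
--     for key in data:
--         if data.get(key, None) is None:
--             continue
--         ckeys = list(data[key].keys())
--         for c in ckeys:
--             d = data[key].get(c, None)
--             if d is None:
--                 continue
--             if not result.get(c, False):
--                 result[c] = {}
--             if not result[c].get(d, False):
--                 result[c][d] = 0
--             result[c][d] += 1
--     return result
-- ===== SOURCE B (Python) =====
-- def taxonomy_info_groups(data):
--     # Pass 1: flat counter keyed by (c, d) pairs, in first-encounter order.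
--     counts = {}
--     for inner in data.values():
--         for c, d in inner.items():
--             counts[(c, d)] = counts.get((c, d), 0) + 1
--     # Pass 2: regroup the flat counts into the nested result dict.
--     result = {}
--     for (c, d), n in counts.items():
--         if c not in result:
--             result[c] = {}
--         result[c][d] = n
--     return result
-- ===== Notes on version B (the rewrite author's own statement) =====
-- stated objective: alternative
-- what changed: Replaces A's interleaved nested-dict creation/truthiness-guarded increments with a flat one-pass counter keyed by (c, d) tuples over data.values()/inner.items(), followed by an explicit regrouping pass that rebuilds the nested dict from the counter in insertion order. Pre_ only excludes association lists with duplicate outer/inner keys, which do not represent any Python dict input.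
import Mathlib
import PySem

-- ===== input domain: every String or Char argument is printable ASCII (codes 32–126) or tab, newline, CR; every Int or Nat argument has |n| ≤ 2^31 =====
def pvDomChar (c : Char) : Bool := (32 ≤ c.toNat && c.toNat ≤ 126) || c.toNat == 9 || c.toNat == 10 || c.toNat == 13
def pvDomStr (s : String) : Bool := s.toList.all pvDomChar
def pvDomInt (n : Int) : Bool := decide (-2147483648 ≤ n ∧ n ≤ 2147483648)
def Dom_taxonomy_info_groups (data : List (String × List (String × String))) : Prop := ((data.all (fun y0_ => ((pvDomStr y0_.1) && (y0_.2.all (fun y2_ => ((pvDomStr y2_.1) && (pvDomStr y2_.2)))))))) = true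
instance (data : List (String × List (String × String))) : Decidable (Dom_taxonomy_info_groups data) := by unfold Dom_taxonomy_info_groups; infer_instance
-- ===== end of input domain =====

-- B replaces A's interleaved nested-dict increments with a flat (c, d)-counter pass followed by
-- an explicit regrouping pass (alternative decomposition, same cost); equality of return values.


-- ===== PORT A =====
-- A-side helper: the body of A's inner loop (c with non-None value d), transliterated.
def pvStepA (result : PySem.Dict String (PySem.Dict String Int)) (c d : String) :
    PySem.Dict String (PySem.Dict String Int) :=
  -- if not result.get(c, False): result[c] = {}       (falsy = missing or empty dict)
  let result1 := if (match result.get? c with | none => true | some g => g.size == 0) then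
      result.insert c PySem.Dict.empty else result
  let g0 := result1.getD c PySem.Dict.empty            -- result[c] (present after the guard)
  -- if not result[c].get(d, False): result[c][d] = 0  (falsy = missing or 0)
  let g1 := if (match g0.get? d with | none => true | some n => n == 0) then g0.insert d 0 else g0
  -- result[c][d] += 1
  let g2 := g1.insert d (g1.getD d 0 + 1)
  result1.insert c g2

def taxonomy_info_groups (data : List (String × List (String × String))) :
    List (String × List (String × Int)) :=
  let dd := PySem.Dict.mk data
  let result := dd.keys.foldl (fun result key =>
      match dd.get? key with                           -- data.get(key, None); None → continue
      | none => result
      | some entry =>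
        let inner := PySem.Dict.mk entry
        inner.keys.foldl (fun result c =>
            match inner.get? c with                    -- data[key].get(c, None); None → continue
            | none => result
            | some d => pvStepA result c d) result)
    PySem.Dict.empty
  result.items.map (fun e => (e.1, e.2.items))

-- ===== PORT B =====
-- B-side helper: the body of B's regrouping loop, transliterated.
def pvStepR (result : PySem.Dict String (PySem.Dict String Int)) (q : (String × String) × Int) :
    PySem.Dict String (PySem.Dict String Int) :=
  let result1 := if result.contains q.1.1 then result else result.insert q.1.1 PySem.Dict.empty
  result1.insert q.1.1 ((result1.getD q.1.1 PySem.Dict.empty).insert q.1.2 q.2)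

def taxonomy_info_groups_alt (data : List (String × List (String × String))) :
    List (String × List (String × Int)) :=
  let dd := PySem.Dict.mk data
  -- Pass 1: counts[(c, d)] = counts.get((c, d), 0) + 1 over data.values() / inner.items()
  let counts := dd.values.foldl (fun counts entry =>
      (PySem.Dict.mk entry).items.foldl
        (fun counts q => counts.insert q (counts.getD q 0 + 1)) counts)
    (PySem.Dict.empty : PySem.Dict (String × String) Int)
  -- Pass 2: regroup the flat counts into the nested result dict
  let result := counts.items.foldl pvStepR PySem.Dict.empty
  result.items.map (fun e => (e.1, e.2.items))

-- ===== PRECONDITION & SPEC =====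
-- Pre_ excludes association lists with duplicate outer or inner keys: such lists do not represent
-- Python dicts (dict construction silently drops the duplicates), so A's value on them is accidental.
def Pre_taxonomy_info_groups (data : List (String × List (String × String))) : Prop :=
  (data.map (·.1)).Nodup ∧ ∀ e ∈ data, (e.2.map (·.1)).Nodup
instance (data : List (String × List (String × String))) : Decidable (Pre_taxonomy_info_groups data) := by
  unfold Pre_taxonomy_info_groups; infer_instance

def pvWitness_taxonomy_info_groups : (List (String × List (String × String))) :=
  [("a", [("x", "u"), ("y", "u")]), ("b", [("x", "u")])]

def Spec_taxonomy_info_groups (data : List (String × List (String × String)))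
    (out : List (String × List (String × Int))) : Prop := out = taxonomy_info_groups_alt data
instance (data : List (String × List (String × String))) (out : List (String × List (String × Int))) :
    Decidable (Spec_taxonomy_info_groups data out) := by unfold Spec_taxonomy_info_groups; infer_instance

-- ===== CLAIM (what is proved, stated in full; the proofs are below) =====
def Claim_equal_taxonomy_info_groups : Prop := ∀ (data : List (String × List (String × String))),
  Dom_taxonomy_info_groups data → Pre_taxonomy_info_groups data →
  Spec_taxonomy_info_groups data (taxonomy_info_groups data)

-- ===== LEMMAS AND PROOFS =====

-- The list of distinct (c, d) occurrences with their counts, in first-encounter order.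
def pvCI (occs : List (String × String)) : List ((String × String) × Int) :=
  (PySem.Set.ofList occs).map (fun k => (k, (occs.count k : Int)))

-- Grouping specification: the outer keys in first-encounter order ...
def pvOuter (L : List ((String × String) × Int)) : List String :=
  PySem.Set.ofList (L.map (fun q => q.1.1))

-- ... and, per outer key c, the inner (d, n) pairs of L in order.
def pvGroupOf (L : List ((String × String) × Int)) (c : String) : List (String × Int) :=
  (L.filter (fun q => q.1.1 == c)).map (fun q => (q.1.2, q.2))

def pvRegSpec (L : List ((String × String) × Int)) : PySem.Dict String (PySem.Dict String Int) :=
  PySem.Dict.mk ((pvOuter L).map (fun c => (c, PySem.Dict.mk (pvGroupOf L c))))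

def pvBump (L : List ((String × String) × Int)) (p : String × String) :
    List ((String × String) × Int) :=
  L.map (fun q => if q.1 == p then (q.1, q.2 + 1) else q)

theorem pvKeyUnique {α β : Type} {L : List (α × β)} (h : (L.map (·.1)).Nodup)
    {k : α} {a b : β} (ha : (k, a) ∈ L) (hb : (k, b) ∈ L) : a = b := by
  induction L with
  | nil => cases ha
  | cons x L ih =>
    obtain ⟨k0, v0⟩ := x
    simp only [List.map_cons, List.nodup_cons] at h
    have hk0 : ∀ v : β, (k0, v) ∈ L → False := fun v hv =>
      h.1 (List.mem_map_of_mem (f := fun q => q.1) hv)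
    rcases List.mem_cons.1 ha with ha' | ha' <;> rcases List.mem_cons.1 hb with hb' | hb'
    · obtain ⟨h1, h2⟩ := Prod.mk.inj ha'
      obtain ⟨h3, h4⟩ := Prod.mk.inj hb'
      rw [h2, h4]
    · obtain ⟨h1, h2⟩ := Prod.mk.inj ha'
      subst h1
      exact (hk0 b hb').elim
    · obtain ⟨h3, h4⟩ := Prod.mk.inj hb'
      subst h3
      exact (hk0 a ha').elim
    · exact ih h.2 ha' hb'

theorem pvRS_items (L : List ((String × String) × Int)) :
    (pvRegSpec L).items = (pvOuter L).map (fun c => (c, PySem.Dict.mk (pvGroupOf L c))) := rfl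

theorem pvRS_keys (L : List ((String × String) × Int)) : (pvRegSpec L).keys = pvOuter L := by
  show ((pvOuter L).map (fun c => (c, PySem.Dict.mk (pvGroupOf L c)))).map (·.1) = pvOuter L
  rw [List.map_map]
  exact (List.map_congr_left fun a _ => rfl).trans (List.map_id _)

theorem pvRS_nodupKeys (L : List ((String × String) × Int)) : (pvRegSpec L).keys.Nodup := by
  rw [pvRS_keys]; exact PySem.Set.nodup_ofList _

theorem pvRS_get?_mem {L : List ((String × String) × Int)} {c : String} (hc : c ∈ pvOuter L) :
    (pvRegSpec L).get? c = some (PySem.Dict.mk (pvGroupOf L c)) :=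
  PySem.Dict.get?_of_mem_items _ (by rw [pvRS_items]; exact List.mem_map_of_mem hc)
    (pvRS_nodupKeys L)

theorem pvRS_get?_not {L : List ((String × String) × Int)} {c : String} (hc : c ∉ pvOuter L) :
    (pvRegSpec L).get? c = none :=
  (PySem.Dict.get?_eq_none_iff_not_mem_keys _ _).2 (by rw [pvRS_keys]; exact hc)

theorem pvRS_contains (L : List ((String × String) × Int)) (c : String) :
    (pvRegSpec L).contains c = decide (c ∈ pvOuter L) := by
  rw [PySem.Dict.contains_eq_decide_mem_keys, pvRS_keys]

theorem pvOuter_mem {L : List ((String × String) × Int)} {q : (String × String) × Int}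
    (h : q ∈ L) : q.1.1 ∈ pvOuter L := by
  rw [pvOuter, PySem.Set.mem_ofList]; exact List.mem_map_of_mem h

theorem pvGroup_mem {L : List ((String × String) × Int)} {c d : String} {n : Int}
    (h : ((c, d), n) ∈ L) : (d, n) ∈ pvGroupOf L c := by
  rw [pvGroupOf]
  exact List.mem_map_of_mem (List.mem_filter.2 ⟨h, by simp⟩)

theorem pvGroup_keys (L : List ((String × String) × Int)) (c : String) :
    (pvGroupOf L c).map (·.1) = ((L.filter (fun q => q.1.1 == c)).map (·.1)).map (·.2) := by
  simp [pvGroupOf]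

theorem pvGroup_key_mem {L : List ((String × String) × Int)} {c d : String}
    (h : d ∈ (pvGroupOf L c).map (·.1)) : (c, d) ∈ L.map (·.1) := by
  rw [pvGroup_keys] at h
  obtain ⟨p, hp, hd⟩ := List.mem_map.1 h
  obtain ⟨q, hq, hqp⟩ := List.mem_map.1 hp
  have hc : q.1.1 = c := by simpa using (List.mem_filter.1 hq).2
  have hcd : q.1 = (c, d) := by cases hqp; exact Prod.ext hc hd
  rw [← hcd]; exact List.mem_map_of_mem (List.mem_filter.1 hq).1

theorem pvGroup_nodup {L : List ((String × String) × Int)} (HK : (L.map (·.1)).Nodup)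
    (c : String) : ((pvGroupOf L c).map (·.1)).Nodup := by
  rw [pvGroup_keys]
  have hsub : ((L.filter (fun q => q.1.1 == c)).map (·.1)).Sublist (L.map (·.1)) :=
    List.Sublist.map _ List.filter_sublist
  have hnd : ((L.filter (fun q => q.1.1 == c)).map (·.1)).Nodup := HK.sublist hsub
  refine List.Nodup.map_on ?_ hnd
  intro x hx y hy hxy
  obtain ⟨qx, hqx, hx1⟩ := List.mem_map.1 hx
  obtain ⟨qy, hqy, hy1⟩ := List.mem_map.1 hy
  have hcx : x.1 = c := by rw [← hx1]; simpa using (List.mem_filter.1 hqx).2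
  have hcy : y.1 = c := by rw [← hy1]; simpa using (List.mem_filter.1 hqy).2
  exact Prod.ext (hcx.trans hcy.symm) hxy

theorem pvGroup_ne_nil {L : List ((String × String) × Int)} {c : String}
    (hc : c ∈ pvOuter L) : pvGroupOf L c ≠ [] := by
  rw [pvOuter, PySem.Set.mem_ofList] at hc
  obtain ⟨q, hq, hqc⟩ := List.mem_map.1 hc
  intro hnil
  have hm : (q.1.2, q.2) ∈ pvGroupOf L c := by
    rw [pvGroupOf]; exact List.mem_map_of_mem (List.mem_filter.2 ⟨hq, by simp [hqc]⟩)
  rw [hnil] at hm; cases hm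

theorem pvMkInsert_fresh {κ ν : Type} [BEq κ] [LawfulBEq κ] [DecidableEq κ] (l : List (κ × ν)) (k : κ) (v : ν)
    (h : k ∉ l.map (·.1)) : (PySem.Dict.mk l).insert k v = PySem.Dict.mk (l ++ [(k, v)]) := by
  have hcon : (PySem.Dict.mk l).contains k = false := by
    rw [PySem.Dict.contains_eq_decide_mem_keys]
    exact decide_eq_false h
  apply PySem.Dict.ext
  rw [PySem.Dict.items_insert_of_not_contains _ _ hcon]

theorem pvMkInsert_mem {κ ν : Type} [BEq κ] [LawfulBEq κ] [DecidableEq κ] (l : List (κ × ν)) (k : κ) (v : ν)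
    (h : k ∈ l.map (·.1)) :
    (PySem.Dict.mk l).insert k v =
      PySem.Dict.mk (l.map (fun p => if p.1 == k then (k, v) else p)) := by
  have hcon : (PySem.Dict.mk l).contains k = true := by
    rw [PySem.Dict.contains_eq_decide_mem_keys]
    exact decide_eq_true h
  apply PySem.Dict.ext
  rw [PySem.Dict.items_insert_of_contains _ _ hcon]

theorem pvEmptyInsert {κ ν : Type} [BEq κ] [LawfulBEq κ] [DecidableEq κ] (k : κ) (v : ν) :
    (PySem.Dict.empty : PySem.Dict κ ν).insert k v = PySem.Dict.mk [(k, v)] :=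
  pvMkInsert_fresh [] k v (by simp)

-- Appending one pair to L, described on pvOuter / pvGroupOf.
theorem pvOuter_append (L : List ((String × String) × Int)) (p : (String × String) × Int) :
    pvOuter (L ++ [p]) = PySem.Set.add (pvOuter L) p.1.1 := by
  rw [pvOuter, pvOuter, List.map_append, List.map_singleton, PySem.Set.ofList_append_singleton]

theorem pvGroup_append (L : List ((String × String) × Int)) (p : (String × String) × Int)
    (c' : String) :
    pvGroupOf (L ++ [p]) c' = pvGroupOf L c' ++ (if p.1.1 = c' then [(p.1.2, p.2)] else []) := by
  rw [pvGroupOf, pvGroupOf, List.filter_append, List.map_append]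
  congr 1
  by_cases h : p.1.1 = c' <;> simp [h]

theorem pvGroup_nil_of_not_mem {L : List ((String × String) × Int)} {c : String}
    (hc : c ∉ pvOuter L) : pvGroupOf L c = [] := by
  by_contra hne
  obtain ⟨r, hr⟩ := List.exists_mem_of_ne_nil _ hne
  obtain ⟨q, hq, _⟩ := List.mem_map.1 hr
  exact hc (by
    rw [pvOuter, PySem.Set.mem_ofList]
    exact List.mem_map.2 ⟨q, (List.mem_filter.1 hq).1, by simpa using (List.mem_filter.1 hq).2⟩)

-- pvRegSpec after appending a pair whose key (c, d) is fresh in L, c already an outer key.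
theorem pvRS_append_old {L : List ((String × String) × Int)} {c d : String} (n : Int)
    (hc : c ∈ pvOuter L) :
    pvRegSpec (L ++ [((c, d), n)]) =
      (pvRegSpec L).insert c (PySem.Dict.mk (pvGroupOf L c ++ [(d, n)])) := by
  have hrw : pvRegSpec L =
      PySem.Dict.mk ((pvOuter L).map (fun c' => (c', PySem.Dict.mk (pvGroupOf L c')))) := rfl
  rw [hrw, pvMkInsert_mem _ _ _ (by simpa using hc)]
  rw [pvRegSpec, pvOuter_append]
  show PySem.Dict.mk ((PySem.Set.add (pvOuter L) c).map _) = _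
  rw [PySem.Set.add_of_mem hc, List.map_map]
  congr 1
  refine List.map_congr_left ?_
  intro c' _
  simp only [Function.comp]
  rw [pvGroup_append]
  by_cases h' : c' = c
  · subst h'; simp
  · have hb : (c' == c) = false := beq_eq_false_iff_ne.2 h'
    have : ¬ ((((c, d), n) : (String × String) × Int).1.1 = c') := fun hh => h' hh.symm
    simp [hb, this]

-- pvRegSpec after appending a pair whose outer key c is new.
theorem pvRS_append_new {L : List ((String × String) × Int)} {c d : String} (n : Int)
    (hc : c ∉ pvOuter L) :
    pvRegSpec (L ++ [((c, d), n)]) = (pvRegSpec L).insert c (PySem.Dict.mk [(d, n)]) := by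
  have hrw : pvRegSpec L =
      PySem.Dict.mk ((pvOuter L).map (fun c' => (c', PySem.Dict.mk (pvGroupOf L c')))) := rfl
  rw [hrw, pvMkInsert_fresh _ _ _ (by simpa using hc)]
  rw [pvRegSpec, pvOuter_append]
  show PySem.Dict.mk ((PySem.Set.add (pvOuter L) c).map _) = _
  rw [PySem.Set.add_of_not_mem hc, List.map_append]
  congr 2
  · refine List.map_congr_left ?_
    intro c' hc'
    rw [pvGroup_append]
    have hne : ¬ ((((c, d), n) : (String × String) × Int).1.1 = c') := fun hh => by
      rw [show c = c' from hh] at hc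
      exact hc hc'
    simp [hne]
  · rw [List.map_singleton, pvGroup_append, pvGroup_nil_of_not_mem hc]
    simp

-- B's regroup step on pvRegSpec, fresh key.
theorem pvStepR_fresh {L : List ((String × String) × Int)} {c d : String} (n : Int)
    (hf : (c, d) ∉ L.map (·.1)) :
    pvStepR (pvRegSpec L) ((c, d), n) = pvRegSpec (L ++ [((c, d), n)]) := by
  rw [pvStepR]
  by_cases hc : c ∈ pvOuter L
  · rw [pvRS_append_old n hc]
    simp only [pvRS_contains, decide_eq_true hc, if_pos]
    rw [PySem.Dict.getD_of_get?_eq_some _ _ (pvRS_get?_mem hc)]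
    rw [pvMkInsert_fresh _ _ _ (fun h => hf (pvGroup_key_mem h))]
  · rw [pvRS_append_new n hc]
    simp only [pvRS_contains, decide_eq_false hc, Bool.false_eq_true, if_false]
    rw [PySem.Dict.getD_insert_self, pvEmptyInsert, PySem.Dict.insert_insert_self]

-- A's step on pvRegSpec, fresh key: creates the entry with count 1.
theorem pvStepA_fresh {L : List ((String × String) × Int)} {c d : String}
    (hf : (c, d) ∉ L.map (·.1)) :
    pvStepA (pvRegSpec L) c d = pvRegSpec (L ++ [((c, d), 1)]) := by
  rw [pvStepA]
  by_cases hc : c ∈ pvOuter L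
  · have hget := pvRS_get?_mem hc
    have hsz : ((PySem.Dict.mk (pvGroupOf L c)).size == 0) = false := by
      show ((pvGroupOf L c).length == 0) = false
      simpa [List.length_eq_zero_iff] using pvGroup_ne_nil hc
    have hdget : (PySem.Dict.mk (pvGroupOf L c)).get? d = none := by
      rw [PySem.Dict.get?_eq_none_iff_not_mem_keys]
      exact fun h => hf (pvGroup_key_mem h)
    rw [pvRS_append_old 1 hc]
    simp only [hget, hsz, Bool.false_eq_true, if_false]
    rw [PySem.Dict.getD_of_get?_eq_some _ _ hget]
    simp only [hdget, if_true]
    rw [PySem.Dict.getD_insert_self, PySem.Dict.insert_insert_self,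
      pvMkInsert_fresh _ _ _ (fun h => hf (pvGroup_key_mem h))]
    norm_num
  · have hget := pvRS_get?_not hc
    rw [pvRS_append_new 1 hc]
    simp [hget, pvEmptyInsert]
    rw [← pvEmptyInsert d (0 : Int), PySem.Dict.getD_insert_self, PySem.Dict.insert_insert_self,
      PySem.Dict.insert_insert_self, pvEmptyInsert]
    norm_num

-- Bumping an existing key, described on pvOuter / pvGroupOf.
theorem pvBump_outer (L : List ((String × String) × Int)) (p : String × String) :
    pvOuter (pvBump L p) = pvOuter L := by
  rw [pvOuter, pvOuter, pvBump, List.map_map]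
  congr 1
  refine List.map_congr_left ?_
  intro q _
  simp only [Function.comp]
  by_cases h : q.1 == p <;> simp [h]

theorem pvBump_filter (L : List ((String × String) × Int)) (p : String × String) (c' : String) :
    (pvBump L p).filter (fun q => q.1.1 == c') =
      (L.filter (fun q => q.1.1 == c')).map (fun q => if q.1 == p then (q.1, q.2 + 1) else q) := by
  rw [pvBump, List.filter_map]
  congr 1
  refine List.filter_congr ?_
  intro q _
  simp only [Function.comp]
  by_cases h : q.1 == p <;> simp [h]

theorem pvBump_group_ne (L : List ((String × String) × Int)) {c : String} (d : String)
    {c' : String} (h : c' ≠ c) : pvGroupOf (pvBump L (c, d)) c' = pvGroupOf L c' := by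
  rw [pvGroupOf, pvGroupOf, pvBump_filter, List.map_map]
  refine List.map_congr_left ?_
  intro q hq
  have hc' : q.1.1 = c' := by simpa using (List.mem_filter.1 hq).2
  have hb : (q.1 == (c, d)) = false := by
    refine beq_eq_false_iff_ne.2 (fun hh => h ?_)
    rw [← hc', hh]
  simp [Function.comp, hb]

theorem pvBump_group_self {L : List ((String × String) × Int)} {c d : String} {n : Int}
    (HK : (L.map (·.1)).Nodup) (hmem : ((c, d), n) ∈ L) :
    pvGroupOf (pvBump L (c, d)) c =
      (pvGroupOf L c).map (fun r => if r.1 == d then (d, n + 1) else r) := by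
  rw [pvGroupOf, pvGroupOf, pvBump_filter, List.map_map, List.map_map]
  refine List.map_congr_left ?_
  intro q hq
  have hc : q.1.1 = c := by simpa using (List.mem_filter.1 hq).2
  have hqL : q ∈ L := (List.mem_filter.1 hq).1
  simp only [Function.comp]
  by_cases h : q.1 = (c, d)
  · have hval : q.2 = n := pvKeyUnique HK (h ▸ hqL) hmem
    simp [h, hval]
  · have h1 : (q.1 == (c, d)) = false := beq_eq_false_iff_ne.2 h
    have h2 : (q.1.2 == d) = false := by
      refine beq_eq_false_iff_ne.2 (fun hh => h ?_)
      exact Prod.ext hc hh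
    simp [h1, h2]

-- A's step on pvRegSpec, existing key (c, d) with count n >= 1: bumps it to n + 1.
theorem pvStepA_bump {L : List ((String × String) × Int)} {c d : String} {n : Int}
    (HK : (L.map (·.1)).Nodup) (hn : 1 ≤ n) (hmem : ((c, d), n) ∈ L) :
    pvStepA (pvRegSpec L) c d = pvRegSpec (pvBump L (c, d)) := by
  have hc : c ∈ pvOuter L := pvOuter_mem hmem
  have hget := pvRS_get?_mem hc
  have hsz : ((PySem.Dict.mk (pvGroupOf L c)).size == 0) = false := by
    show ((pvGroupOf L c).length == 0) = false
    simpa [List.length_eq_zero_iff] using pvGroup_ne_nil hc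
  rw [pvStepA]
  simp only [hget, hsz, Bool.false_eq_true, if_false]
  rw [PySem.Dict.getD_of_get?_eq_some _ _ hget]
  have hdget : (PySem.Dict.mk (pvGroupOf L c)).get? d = some n :=
    PySem.Dict.get?_of_mem_items _ (pvGroup_mem hmem) (pvGroup_nodup HK c)
  have hn0 : (n == 0) = false := beq_eq_false_iff_ne.2 (by omega)
  simp only [hdget, hn0, Bool.false_eq_true, if_false]
  rw [PySem.Dict.getD_of_get?_eq_some _ _ hdget]
  have hdm : d ∈ (pvGroupOf L c).map (·.1) := List.mem_map_of_mem (pvGroup_mem hmem)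
  rw [pvMkInsert_mem _ _ _ hdm]
  have hrw : pvRegSpec L =
      PySem.Dict.mk ((pvOuter L).map (fun c' => (c', PySem.Dict.mk (pvGroupOf L c')))) := rfl
  rw [hrw, pvMkInsert_mem _ _ _ (by simpa using hc)]
  rw [pvRegSpec, pvBump_outer, List.map_map]
  congr 1
  refine List.map_congr_left ?_
  intro c' _
  simp only [Function.comp]
  by_cases h : c' = c
  · subst h
    rw [pvBump_group_self HK hmem]
    simp
  · have hb : (c' == c) = false := beq_eq_false_iff_ne.2 h
    rw [pvBump_group_ne L d h]
    simp [hb]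

-- pvCI under appending one occurrence.
theorem pvCI_keys (occs : List (String × String)) :
    (pvCI occs).map (·.1) = PySem.Set.ofList occs := by
  rw [pvCI, List.map_map]
  exact (List.map_congr_left fun a _ => rfl).trans (List.map_id _)

theorem pvCI_nodup (occs : List (String × String)) : ((pvCI occs).map (·.1)).Nodup := by
  rw [pvCI_keys]; exact PySem.Set.nodup_ofList _

theorem pvCI_append_mem {occs : List (String × String)} {p : String × String} (h : p ∈ occs) :
    pvCI (occs ++ [p]) = pvBump (pvCI occs) p := by
  rw [pvCI, pvBump, pvCI, PySem.Set.ofList_append_singleton,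
    PySem.Set.add_of_mem ((PySem.Set.mem_ofList occs p).2 h), List.map_map]
  refine List.map_congr_left ?_
  intro k _
  simp only [Function.comp]
  by_cases hk : k = p
  · subst hk
    simp only [beq_self_eq_true, if_pos]
    rw [List.count_append]
    have h1 : [k].count k = 1 := by simp
    rw [h1]
    push_cast
    ring_nf
  · have h1 : (k == p) = false := beq_eq_false_iff_ne.2 hk
    rw [List.count_append]
    have h0 : [p].count k = 0 := by
      simp [List.count_cons, beq_eq_false_iff_ne.2 (fun hh : p = k => hk hh.symm)]
    rw [h0]
    simp [h1]

theorem pvCI_append_fresh {occs : List (String × String)} {p : String × String} (h : p ∉ occs) :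
    pvCI (occs ++ [p]) = pvCI occs ++ [(p, 1)] := by
  rw [pvCI, pvCI, PySem.Set.ofList_append_singleton,
    PySem.Set.add_of_not_mem (fun hh => h ((PySem.Set.mem_ofList occs p).1 hh)), List.map_append]
  congr 1
  · refine List.map_congr_left ?_
    intro k hk
    have hkp : k ≠ p := fun hh => h (hh ▸ (PySem.Set.mem_ofList occs k).1 hk)
    rw [List.count_append]
    have h0 : [p].count k = 0 := by
      simp [List.count_cons, beq_eq_false_iff_ne.2 (fun hh : p = k => hkp hh.symm)]
    rw [h0]
    simp
  · rw [List.map_singleton, List.count_append]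
    have h0 : occs.count p = 0 := List.count_eq_zero.2 h
    have h1 : [p].count p = 1 := by simp
    rw [h0, h1]
    norm_num

-- A's whole occurrence fold computes pvRegSpec of the counter items.
theorem pvA_fold (occs : List (String × String)) :
    occs.foldl (fun res q => pvStepA res q.1 q.2) PySem.Dict.empty = pvRegSpec (pvCI occs) := by
  induction occs using List.reverseRecOn with
  | nil => rfl
  | append_singleton occs p ih =>
    rw [List.foldl_append, List.foldl_cons, List.foldl_nil, ih]
    by_cases h : p ∈ occs
    · have hmem : ((p.1, p.2), (occs.count p : Int)) ∈ pvCI occs := by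
        rw [pvCI]
        have hp : p ∈ PySem.Set.ofList occs := (PySem.Set.mem_ofList occs p).2 h
        simpa using List.mem_map_of_mem (f := fun k => (k, (occs.count k : Int))) hp
      have hn : (1 : Int) ≤ (occs.count p : Int) := by
        have := List.count_pos_iff.2 h
        omega
      rw [pvStepA_bump (pvCI_nodup occs) hn hmem, ← pvCI_append_mem h]
    · have hf : (p.1, p.2) ∉ (pvCI occs).map (·.1) := by
        rw [pvCI_keys, PySem.Set.mem_ofList]
        simpa using h
      rw [pvStepA_fresh hf, ← pvCI_append_fresh h]

-- B's regroup fold computes pvRegSpec, given distinct keys.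
theorem pvR_fold (L : List ((String × String) × Int)) (HK : (L.map (·.1)).Nodup) :
    L.foldl pvStepR PySem.Dict.empty = pvRegSpec L := by
  induction L using List.reverseRecOn with
  | nil => rfl
  | append_singleton L q ih =>
    rw [List.map_append, List.map_singleton, List.nodup_append] at HK
    have hnd : (L.map (·.1)).Nodup := HK.1
    have hf : q.1 ∉ L.map (·.1) := by
      intro hm
      exact HK.2.2 q.1 hm q.1 (List.mem_singleton_self _) rfl
    rw [List.foldl_append, List.foldl_cons, List.foldl_nil, ih hnd]
    obtain ⟨⟨c, d⟩, n⟩ := q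
    exact pvStepR_fresh n hf

-- Port A reduces to the occurrence fold, given dict-shaped input.
theorem pvPortA (data : List (String × List (String × String)))
    (h1 : (data.map (·.1)).Nodup) (h2 : ∀ e ∈ data, (e.2.map (·.1)).Nodup) :
    taxonomy_info_groups data =
      (pvRegSpec (pvCI (data.flatMap (·.2)))).items.map (fun e => (e.1, e.2.items)) := by
  rw [taxonomy_info_groups]
  have hkeys : (PySem.Dict.mk data).keys = data.map (·.1) := rfl
  rw [hkeys, List.foldl_map]
  rw [PySem.List.foldl_congr_mem data _
    (fun res e => e.2.foldl (fun res q => pvStepA res q.1 q.2) res) PySem.Dict.empty ?_]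
  · rw [← List.foldl_flatMap, pvA_fold]
  · intro acc e he
    have hget : (PySem.Dict.mk data).get? e.1 = some e.2 := by
      refine PySem.Dict.get?_of_mem_items _ ?_ ?_
      · show (e.1, e.2) ∈ data
        exact he
      · rw [hkeys]; exact h1
    simp only [hget]
    have hik : (PySem.Dict.mk e.2).keys = e.2.map (·.1) := rfl
    rw [hik, List.foldl_map]
    refine PySem.List.foldl_congr_mem e.2 _ _ acc ?_
    intro acc' q hq
    have hq2 : (PySem.Dict.mk e.2).get? q.1 = some q.2 := by
      refine PySem.Dict.get?_of_mem_items _ ?_ ?_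
      · show (q.1, q.2) ∈ e.2
        exact hq
      · rw [hik]; exact h2 e he
    simp only [hq2]

-- Port B reduces to the same pvRegSpec.
theorem pvPortB (data : List (String × List (String × String))) :
    taxonomy_info_groups_alt data =
      (pvRegSpec (pvCI (data.flatMap (·.2)))).items.map (fun e => (e.1, e.2.items)) := by
  rw [taxonomy_info_groups_alt]
  have hvals : (PySem.Dict.mk data).values = data.map (·.2) := rfl
  rw [hvals, List.foldl_map]
  have hcounts : data.foldl (fun counts e =>
        (PySem.Dict.mk e.2).items.foldl
          (fun counts q => counts.insert q (counts.getD q 0 + 1)) counts)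
      (PySem.Dict.empty : PySem.Dict (String × String) Int)
      = PySem.Dict.counter (data.flatMap (·.2)) := by
    rw [← PySem.Dict.foldl_insert_getD_add_one_eq_counter, List.foldl_flatMap]
  rw [hcounts, PySem.Dict.items_counter]
  have hci : (PySem.Set.ofList (data.flatMap (·.2))).map
      (fun k => (k, ((data.flatMap (·.2)).count k : Int))) = pvCI (data.flatMap (·.2)) := rfl
  rw [hci, pvR_fold _ (pvCI_nodup _)]

-- ===== VERDICT (by name: the statement is the Claim_ definition above) =====
theorem taxonomy_info_groups_spec : Claim_equal_taxonomy_info_groups := by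
  intro data _ hpre
  unfold Spec_taxonomy_info_groups
  rw [pvPortA data hpre.1 hpre.2, pvPortB data]
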